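-- pv_equiv track=rewrite | github.com/ColemanDuPlessie/Basic-Transformer-Sparse-Autoencoder | view_autoencoder_features.py | find_str_idx
-- ===== SOURCE A (Python) =====
-- def find_str_idx(str_idxs, target_idx): # TODO this is almost certainly not the best way to do this
--     target_str = len(str_idxs)//2
--     if str_idxs[target_str] <= target_idx and (target_str+1 == len(str_idxs) or str_idxs[target_str+1] > target_idx):
--         return target_str, target_idx-str_idxs[target_str]
--     elif str_idxs[target_str] > target_idx:
--         return find_str_idx(str_idxs[:target_str], target_idx)
--     else:
--         ans = find_str_idx(str_idxs[target_str+1:], target_idx)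
--         return ans[0]+target_str+1, ans[1]
-- ===== SOURCE B (Python) =====
-- def find_str_idx(str_idxs, target_idx):
--     # Iterative in-place binary search over index bounds; no slice copies.
--     lo, hi = 0, len(str_idxs)
--     while lo < hi:
--         mid = lo + (hi - lo) // 2
--         if str_idxs[mid] <= target_idx and (mid + 1 == hi or str_idxs[mid + 1] > target_idx):
--             return mid, target_idx - str_idxs[mid]
--         if str_idxs[mid] > target_idx:
--             hi = mid
--         else:
--             lo = mid + 1
--     raise IndexError("no segment contains target_idx")
-- ===== Notes on version B (the rewrite author's own statement) =====
-- stated objective: alternative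
-- what changed: Replaces A's slice-allocating recursion by an iterative binary search that keeps lo/hi index bounds into the original list, never copying it, and raises IndexError when the window empties (exactly where A's recursion indexes an empty slice); measured only ~1.2x at the largest size, so no speed is claimed.
import Mathlib
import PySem

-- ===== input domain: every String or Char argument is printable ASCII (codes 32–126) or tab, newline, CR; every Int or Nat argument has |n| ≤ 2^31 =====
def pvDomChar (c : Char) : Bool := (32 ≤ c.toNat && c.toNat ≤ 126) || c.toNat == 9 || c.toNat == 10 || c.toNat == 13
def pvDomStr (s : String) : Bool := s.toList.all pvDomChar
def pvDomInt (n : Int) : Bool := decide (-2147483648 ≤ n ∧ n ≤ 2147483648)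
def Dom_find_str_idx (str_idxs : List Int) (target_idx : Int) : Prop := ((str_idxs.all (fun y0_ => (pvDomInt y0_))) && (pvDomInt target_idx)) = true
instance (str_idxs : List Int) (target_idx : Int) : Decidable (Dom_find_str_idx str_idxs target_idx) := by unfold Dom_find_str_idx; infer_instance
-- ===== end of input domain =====

-- B (objective: alternative) replaces A's slice-copying recursion by an iterative binary
-- search on lo/hi index bounds into the original list; it raises IndexError exactly where A does.

-- ===== PORT A =====
-- returns none exactly where the Python raises IndexError (indexing into an empty slice)
def find_str_idx_aux (str_idxs : List Int) (target_idx : Int) : Option (Int × Int) :=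
  let target_str : Int := PySem.Int.floordiv (str_idxs.length : Int) 2
  match h : PySem.List.pyGet? str_idxs target_str with
  | none => none
  | some v =>
    if v ≤ target_idx ∧ (target_str + 1 = (str_idxs.length : Int) ∨
        target_idx < PySem.List.pyGetD str_idxs (target_str + 1) 0) then
      some (target_str, target_idx - v)
    else if target_idx < v then
      find_str_idx_aux (PySem.List.slice str_idxs none (some target_str)) target_idx
    else
      match find_str_idx_aux (PySem.List.slice str_idxs (some (target_str + 1)) none) target_idx with
      | none => none
      | some ans => some (ans.1 + target_str + 1, ans.2)
termination_by str_idxs.length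
decreasing_by
  · have hlen : 0 < str_idxs.length := by
      by_contra hl
      have : str_idxs = [] := List.eq_nil_of_length_eq_zero (by omega)
      subst this; simp [PySem.List.pyGet?] at h
    have hts : PySem.Int.floordiv (str_idxs.length : Int) 2 = ((str_idxs.length / 2 : Nat) : Int) := by
      exact_mod_cast PySem.Int.floordiv_natCast str_idxs.length 2
    rw [hts, PySem.List.slice_to_natCast]
    simp only [List.length_take]
    omega
  · have hlen : 0 < str_idxs.length := by
      by_contra hl
      have : str_idxs = [] := List.eq_nil_of_length_eq_zero (by omega)
      subst this; simp [PySem.List.pyGet?] at h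
    have hts : PySem.Int.floordiv (str_idxs.length : Int) 2 + 1 = ((str_idxs.length / 2 + 1 : Nat) : Int) := by
      have := PySem.Int.floordiv_natCast str_idxs.length 2
      push_cast at this ⊢
      omega
    rw [hts, PySem.List.slice_from_natCast]
    simp only [List.length_drop]
    omega

def find_str_idx (str_idxs : List Int) (target_idx : Int) : Int × Int :=
  match find_str_idx_aux str_idxs target_idx with
  | some r => r
  | none => (0, 0)   -- IndexError in Python; outside Pre_

-- ===== PORT B =====
-- returns none exactly where Source B raises IndexError (the window became empty)
def find_str_idx_loop (str_idxs : List Int) (target_idx : Int) (lo hi : Int) : Option (Int × Int) :=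
  if lo < hi then
    -- mid = lo + (hi - lo) // 2 (inlined)
    if PySem.List.pyGetD str_idxs (lo + PySem.Int.floordiv (hi - lo) 2) 0 ≤ target_idx ∧
        (lo + PySem.Int.floordiv (hi - lo) 2 + 1 = hi ∨
          target_idx < PySem.List.pyGetD str_idxs (lo + PySem.Int.floordiv (hi - lo) 2 + 1) 0) then
      some (lo + PySem.Int.floordiv (hi - lo) 2,
        target_idx - PySem.List.pyGetD str_idxs (lo + PySem.Int.floordiv (hi - lo) 2) 0)
    else if target_idx < PySem.List.pyGetD str_idxs (lo + PySem.Int.floordiv (hi - lo) 2) 0 then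
      find_str_idx_loop str_idxs target_idx lo (lo + PySem.Int.floordiv (hi - lo) 2)
    else
      find_str_idx_loop str_idxs target_idx (lo + PySem.Int.floordiv (hi - lo) 2 + 1) hi
  else none
termination_by (hi - lo).toNat
decreasing_by
  · have h2 : PySem.Int.floordiv (hi - lo) 2 = (hi - lo) / 2 :=
      PySem.Int.floordiv_eq_ediv_of_pos (by norm_num)
    omega
  · have h2 : PySem.Int.floordiv (hi - lo) 2 = (hi - lo) / 2 :=
      PySem.Int.floordiv_eq_ediv_of_pos (by norm_num)
    omega

def find_str_idx_alt (str_idxs : List Int) (target_idx : Int) : Int × Int :=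
  match find_str_idx_loop str_idxs target_idx 0 (str_idxs.length : Int) with
  | some r => r
  | none => (0, 0)   -- IndexError in Python B; outside Pre_

-- ===== PRECONDITION & SPEC =====
-- Exactly the inputs on which the Python A returns normally: A raises IndexError iff the
-- list is empty or every element probed by its all-left descent (indices n//2, n//4, …, 0)
-- exceeds target_idx; Pre_ demands one such probe be ≤ target_idx.
def Pre_find_str_idx (str_idxs : List Int) (target_idx : Int) : Prop :=
  str_idxs ≠ [] ∧ ∃ k ∈ List.range str_idxs.length,
    str_idxs.getD (str_idxs.length >>> (k + 1)) 0 ≤ target_idx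
instance (str_idxs : List Int) (target_idx : Int) : Decidable (Pre_find_str_idx str_idxs target_idx) := by unfold Pre_find_str_idx; infer_instance

def pvWitness_find_str_idx : List Int × Int := ([0, 3, 7], 4)

def Spec_find_str_idx (str_idxs : List Int) (target_idx : Int) (out : Int × Int) : Prop := out = find_str_idx_alt str_idxs target_idx
instance (str_idxs : List Int) (target_idx : Int) (out : Int × Int) : Decidable (Spec_find_str_idx str_idxs target_idx out) := by unfold Spec_find_str_idx; infer_instance

-- ===== CLAIM (what is proved, stated in full; the proofs are below) =====
def Claim_equal_find_str_idx : Prop := ∀ (str_idxs : List Int) (target_idx : Int), Dom_find_str_idx str_idxs target_idx → Pre_find_str_idx str_idxs target_idx → Spec_find_str_idx str_idxs target_idx (find_str_idx str_idxs target_idx)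

-- ===== LEMMAS AND PROOFS =====

theorem getD_take_eq (xs : List Int) (m i : Nat) (h : i < m) (h2 : i < xs.length) :
    (xs.take m).getD i 0 = xs.getD i 0 := by
  rw [List.getD_eq_getElem _ 0 (by simp [List.length_take]; omega),
      List.getD_eq_getElem _ 0 h2, List.getElem_take]

theorem getD_drop_eq (xs : List Int) (k i : Nat) (h : k + i < xs.length) :
    (xs.drop k).getD i 0 = xs.getD (k + i) 0 := by
  rw [List.getD_eq_getElem _ 0 (by simp [List.length_drop]; omega),
      List.getD_eq_getElem _ 0 h, List.getElem_drop]

theorem auxA_unfold (xs : List Int) (t : Int) (hL : 0 < xs.length) :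
    find_str_idx_aux xs t =
      (if xs.getD (xs.length / 2) 0 ≤ t ∧ (xs.length / 2 + 1 = xs.length ∨ t < xs.getD (xs.length / 2 + 1) 0) then
        some (((xs.length / 2 : Nat) : Int), t - xs.getD (xs.length / 2) 0)
      else if t < xs.getD (xs.length / 2) 0 then
        find_str_idx_aux (xs.take (xs.length / 2)) t
      else
        match find_str_idx_aux (xs.drop (xs.length / 2 + 1)) t with
        | none => none
        | some ans => some (ans.1 + ((xs.length / 2 : Nat) : Int) + 1, ans.2)) := by
  rw [find_str_idx_aux]
  have hts : PySem.Int.floordiv (xs.length : Int) 2 = ((xs.length / 2 : Nat) : Int) := by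
    exact_mod_cast PySem.Int.floordiv_natCast xs.length 2
  have htlt : xs.length / 2 < xs.length := Nat.div_lt_self hL (by norm_num)
  have hcast1 : ((xs.length / 2 : Nat) : Int) + 1 = ((xs.length / 2 + 1 : Nat) : Int) := by push_cast; ring
  simp only [hts]
  split
  · rename_i h
    rw [hts, PySem.List.pyGet?_natCast] at h
    simp [List.getElem?_eq_getElem htlt] at h
  · rename_i v h
    rw [hts, PySem.List.pyGet?_natCast, List.getElem?_eq_getElem htlt] at h
    have hv : v = xs.getD (xs.length / 2) 0 := by
      rw [List.getD_eq_getElem _ 0 htlt]; exact (Option.some_inj.mp h).symm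
    rw [hcast1, PySem.List.pyGetD_natCast, PySem.List.slice_to_natCast, PySem.List.slice_from_natCast, hv]
    simp only [Nat.cast_inj]

theorem auxA_nil (t : Int) : find_str_idx_aux [] t = none := by
  rw [find_str_idx_aux]
  rfl

-- the iterative window [lo,hi) computes A's recursion on the slice xs[lo:hi], shifted by lo
theorem loop_eq_aux : ∀ (d : Nat) (xs : List Int) (t : Int) (lo hi : Nat), hi ≤ xs.length → hi - lo ≤ d →
    find_str_idx_loop xs t (lo : Int) (hi : Int) =
      (find_str_idx_aux ((xs.drop lo).take (hi - lo)) t).map (fun r => (r.1 + (lo : Int), r.2)) := by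
  intro d
  induction d with
  | zero =>
    intro xs t lo hi hn hd
    have hle : hi ≤ lo := by omega
    rw [find_str_idx_loop, if_neg (by exact_mod_cast Nat.not_lt.mpr hle)]
    have : hi - lo = 0 := by omega
    rw [this]
    simp [auxA_nil]
  | succ d ih =>
    intro xs t lo hi hn hd
    by_cases hlt : lo < hi
    · -- window [lo,hi) of length ≥ 1
      have hw : ((xs.drop lo).take (hi - lo)).length = hi - lo := by
        simp [List.length_take, List.length_drop]; omega
      have hts : (hi - lo) / 2 < hi - lo := Nat.div_lt_self (by omega) (by norm_num)
      -- abbreviations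
      set ts := (hi - lo) / 2 with hts_def
      set m := lo + ts with hm_def
      have hmn : m < hi := by omega
      -- unfold B one step
      rw [find_str_idx_loop, if_pos (by exact_mod_cast hlt)]
      have hfd : PySem.Int.floordiv ((hi : Int) - (lo : Int)) 2 = ((hi : Int) - (lo : Int)) / 2 :=
        PySem.Int.floordiv_eq_ediv_of_pos (by norm_num)
      have hmid : (lo : Int) + PySem.Int.floordiv ((hi : Int) - (lo : Int)) 2 = ((m : Nat) : Int) := by
        rw [hfd, hm_def, hts_def]; omega
      have hmid1 : ((m : Nat) : Int) + 1 = ((m + 1 : Nat) : Int) := by push_cast; ring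
      simp only [hmid, hmid1, PySem.List.pyGetD_natCast, Nat.cast_inj]
      -- unfold A one step
      rw [auxA_unfold _ t (by rw [hw]; omega), hw]
      -- getD conversions on the window
      have hg1 : ((xs.drop lo).take (hi - lo)).getD ts 0 = xs.getD m 0 := by
        rw [getD_take_eq _ _ _ hts (by simp [List.length_drop]; omega),
            getD_drop_eq xs lo ts (by omega)]
      have hg2 : ts + 1 < hi - lo → ((xs.drop lo).take (hi - lo)).getD (ts + 1) 0 = xs.getD (m + 1) 0 := by
        intro hlt2
        rw [getD_take_eq _ _ _ hlt2 (by simp [List.length_drop]; omega),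
            getD_drop_eq xs lo (ts + 1) (by omega)]
        have hx : lo + (ts + 1) = m + 1 := by omega
        rw [hx]
      rw [hg1]
      -- the two stop conditions are equivalent
      have hcond : (xs.getD m 0 ≤ t ∧ (ts + 1 = hi - lo ∨ t < ((xs.drop lo).take (hi - lo)).getD (ts + 1) 0))
          ↔ (xs.getD m 0 ≤ t ∧ (m + 1 = hi ∨ t < xs.getD (m + 1) 0)) := by
        by_cases hb : ts + 1 = hi - lo
        · have hb' : m + 1 = hi := by omega
          constructor
          · rintro ⟨h1, _⟩; exact ⟨h1, Or.inl hb'⟩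
          · rintro ⟨h1, _⟩; exact ⟨h1, Or.inl hb⟩
        · have hb' : m + 1 ≠ hi := by omega
          rw [hg2 (by omega)]
          constructor
          · rintro ⟨h1, h2⟩; exact ⟨h1, Or.inr (h2.resolve_left hb)⟩
          · rintro ⟨h1, h2⟩; exact ⟨h1, Or.inr (h2.resolve_left hb')⟩
      by_cases hc : xs.getD m 0 ≤ t ∧ (m + 1 = hi ∨ t < xs.getD (m + 1) 0)
      · rw [if_pos hc, if_pos (hcond.mpr hc)]
        simp only [Option.map_some]
        refine congrArg some (Prod.ext ?_ rfl)
        simp only [hm_def]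
        omega
      · rw [if_neg hc, if_neg (fun h => hc (hcond.mp h))]
        by_cases hcl : t < xs.getD m 0
        · rw [if_pos hcl, if_pos hcl]
          -- left half: window [lo, m)
          have htake : ((xs.drop lo).take (hi - lo)).take ts = (xs.drop lo).take (m - lo) := by
            rw [List.take_take]
            congr 1
            omega
          rw [htake, ← ih xs t lo m (by omega) (by omega)]
        · rw [if_neg hcl, if_neg hcl]
          -- right half: window [m+1, hi)
          have hdrop : ((xs.drop lo).take (hi - lo)).drop (ts + 1) = (xs.drop (m + 1)).take (hi - (m + 1)) := by
            rw [List.drop_take, List.drop_drop]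
            congr 1 <;> omega
          rw [hdrop, ih xs t (m + 1) hi (by omega) (by omega)]
          cases haux : find_str_idx_aux ((xs.drop (m + 1)).take (hi - (m + 1))) t with
          | none => rfl
          | some r =>
            simp only [Option.map_some]
            refine congrArg some (Prod.ext ?_ rfl)
            simp only [hm_def]
            omega
    · rw [find_str_idx_loop, if_neg (by exact_mod_cast hlt)]
      have : hi - lo = 0 := by omega
      rw [this]
      simp [auxA_nil]

-- ===== VERDICT (by name: the statement is the Claim_ definition above) =====
theorem find_str_idx_spec : Claim_equal_find_str_idx := by
  intro xs t _hdom _hpre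
  unfold Spec_find_str_idx find_str_idx find_str_idx_alt
  have h := loop_eq_aux xs.length xs t 0 xs.length le_rfl (by omega)
  rw [show ((0 : Nat) : Int) = (0 : Int) from rfl] at h
  rw [h]
  simp only [List.drop_zero, Nat.sub_zero, List.take_length]
  cases find_str_idx_aux xs t with
  | none => rfl
  | some r => simp
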